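-- pv_equiv track=rewrite | github.com/mark0613/lazy_ta | src/test_runner.py | compare_output
-- ===== SOURCE A (Python) =====
-- def compare_output(expected: str, actual: str) -> bool:
--     """
--     比對輸出是否相符
--
--     規則:
--     - 逐行比對
--     - 忽略行尾空白
--     - 忽略檔案結尾空行
--
--     Args:
--         expected: 預期輸出
--         actual: 實際輸出
--
--     Returns:
--         是否相符
--     """
--     # 分割成行並去除行尾空白
--     expected_lines = [line.rstrip() for line in expected.splitlines()]
--     actual_lines = [line.rstrip() for line in actual.splitlines()]
--
--     # 移除結尾的空行
--     while expected_lines and not expected_lines[-1]: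
--         expected_lines.pop()
--
--     while actual_lines and not actual_lines[-1]:
--         actual_lines.pop()
--
--     # 逐行比對
--     return expected_lines == actual_lines
-- ===== SOURCE B (Python) =====
-- def compare_output(expected: str, actual: str) -> bool:
--     """
--     比對輸出是否相符 (lock-step two-pointer scan)
--
--     Rules: line-by-line, ignoring trailing whitespace per line and
--     trailing blank lines — checked in one simultaneous pass with early
--     exit, without building any line lists.
--     """
--     i, j = 0, 0
--     while True:
--         if _rest_blank(expected, i) or _rest_blank(actual, j):
--             # only (possibly) trailing blank lines remain on one side:
--             # match iff the other side is also down to blanks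
--             return _rest_blank(expected, i) and _rest_blank(actual, j)
--         ie, i2 = _line_span(expected, i)
--         je, j2 = _line_span(actual, j)
--         if expected[i:ie] != actual[j:je]:
--             return False
--         i, j = i2, j2
--
--
-- def _rest_blank(s: str, i: int) -> bool:
--     """True iff s[i:] contains only whitespace (blank lines)."""
--     while i < len(s):
--         if s[i] not in " \t\r\n":
--             return False
--         i += 1
--     return True
--
--
-- def _line_span(s: str, i: int):
--     """For the line starting at i: (end of its content after stripping
--     trailing blanks, start index of the next line)."""
--     j = i
--     n = len(s)
--     while j < n and s[j] != "\n" and s[j] != "\r":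
--         j += 1
--     e = j
--     while e > i and (s[e - 1] == " " or s[e - 1] == "\t"):
--         e -= 1
--     if j < n:
--         j += 2 if s[j] == "\r" and j + 1 < n and s[j + 1] == "\n" else 1
--     return e, j
-- ===== Notes on version B (the rewrite author's own statement) =====
-- stated objective: alternative
-- what changed: B replaces A's build-both-line-lists / pop-trailing-blanks / list-compare pipeline by a lock-step two-pointer scan over the raw strings: it repeatedly locates one line span on each side, compares the spans, and exits early at the first mismatch, never materialising line lists.
import Mathlib
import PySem

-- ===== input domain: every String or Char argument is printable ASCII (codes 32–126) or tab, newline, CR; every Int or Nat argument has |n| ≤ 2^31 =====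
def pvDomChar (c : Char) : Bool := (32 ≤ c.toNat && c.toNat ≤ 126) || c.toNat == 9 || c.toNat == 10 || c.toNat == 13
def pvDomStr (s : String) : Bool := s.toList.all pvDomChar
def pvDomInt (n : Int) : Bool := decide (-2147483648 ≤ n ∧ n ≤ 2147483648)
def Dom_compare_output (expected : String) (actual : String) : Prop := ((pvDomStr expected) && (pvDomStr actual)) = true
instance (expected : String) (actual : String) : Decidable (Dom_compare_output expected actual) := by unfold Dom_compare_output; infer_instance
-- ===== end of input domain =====

-- B replaces A's build-lists / pop-trailing-blanks / compare-lists pipeline by a lock-step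
-- two-pointer scan comparing one line span at a time with early exit; same return value.

-- ===== PORT A =====
-- [line.rstrip() for line in s.splitlines()]
def pvLines (s : String) : List (List Char) :=
  (PySem.Chars.splitlines s.toList).map PySem.Chars.rstrip

-- 'while lines and not lines[-1]: lines.pop()'
def pvPopBlanks (xs : List (List Char)) : List (List Char) :=
  if xs.getLast? = some [] then pvPopBlanks xs.dropLast else xs
termination_by xs.length
decreasing_by
  rename_i h
  cases xs with
  | nil => simp at h
  | cons a t => simp [List.length_dropLast]

def compare_output (expected : String) (actual : String) : Bool :=
  pvPopBlanks (pvLines expected) == pvPopBlanks (pvLines actual)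

-- ===== PORT B =====
-- '_rest_blank': the remaining suffix contains only whitespace (blank lines)
def pvRestBlank (s : List Char) : Bool :=
  s.all (fun c => c == ' ' || c == '\t' || c == '\r' || c == '\n')

-- first while loop of '_line_span': raw content of the first line, and the
-- suffix after its line break ('\r\n' consumed as one break)
def pvSplit1 : List Char → List Char × List Char
  | [] => ([], [])
  | c :: t =>
    if c == '\n' then ([], t)
    else if c == '\r' then ([], if t.head? == some '\n' then t.tail else t)
    else
      let p := pvSplit1 t
      (c :: p.1, p.2)

-- second while loop of '_line_span': drop trailing spaces/tabs of the content
def pvStripTB (l : List Char) : List Char :=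
  (l.reverse.dropWhile (fun c => c == ' ' || c == '\t')).reverse

theorem pvSplit1_len (s : List Char) (h : s ≠ []) : (pvSplit1 s).2.length < s.length := by
  cases s with
  | nil => exact absurd rfl h
  | cons c t =>
    rw [pvSplit1]
    split_ifs with h1 h2 h3
    · simp
    · cases t with
      | nil => simp
      | cons d t' => simp
    · simp
    · show (pvSplit1 t).2.length < (c :: t).length
      simp only [List.length_cons]
      by_cases ht : t = []
      · subst ht; simp [pvSplit1]
      · exact Nat.lt_succ_of_lt (pvSplit1_len t ht)

-- the main loop of B: compare one line span from each side, recurse on the rests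
def pvCmp (e a : List Char) : Bool :=
  if pvRestBlank e || pvRestBlank a then pvRestBlank e && pvRestBlank a
  else
    (pvStripTB (pvSplit1 e).1 == pvStripTB (pvSplit1 a).1) && pvCmp (pvSplit1 e).2 (pvSplit1 a).2
termination_by e.length
decreasing_by
  rename_i h
  apply pvSplit1_len
  intro he
  subst he
  simp [pvRestBlank] at h

def compare_output_alt (expected : String) (actual : String) : Bool :=
  pvCmp expected.toList actual.toList

-- ===== PRECONDITION & SPEC =====
def Spec_compare_output (expected : String) (actual : String) (out : Bool) : Prop := out = compare_output_alt expected actual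
instance (expected : String) (actual : String) (out : Bool) : Decidable (Spec_compare_output expected actual out) := by unfold Spec_compare_output; infer_instance

-- ===== CLAIM (what is proved, stated in full; the proofs are below) =====
def Claim_equal_compare_output : Prop := ∀ (expected : String) (actual : String), Dom_compare_output expected actual → Spec_compare_output expected actual (compare_output expected actual)

-- ===== LEMMAS AND PROOFS =====

theorem pvCharToNatInj (c d : Char) (h : c.toNat = d.toNat) : c = d := by
  apply Char.ext; apply UInt32.toNat_inj.mp; exact h

theorem pvCharBeqNat (c d : Char) : (c == d) = decide (c.toNat = d.toNat) := by
  by_cases h : c = d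
  · subst h; simp
  · have h2 : ¬ c.toNat = d.toNat := fun hn => h (pvCharToNatInj c d hn)
    simp [h, h2]

-- splitlines' break predicate, named
def pvB (c : Char) : Bool :=
  have n := c.toNat
  decide (n = 10) || decide (n = 13) || decide (n = 11) || decide (n = 12) || decide (n = 28) ||
    decide (n = 29) || decide (n = 30) || decide (n = 133) || decide (n = 8232) || decide (n = 8233)

theorem pv_splitlines_eq (s : List Char) :
    PySem.Chars.splitlines s = PySem.Chars.splitlines.go pvB s [] [] := rfl

theorem pv_dom_facts (c : Char) (h : pvDomChar c = true) :
    ((32 ≤ c.toNat ∧ c.toNat ≤ 126 ∨ c.toNat = 9) ∨ c.toNat = 10) ∨ c.toNat = 13 := by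
  simpa [pvDomChar, Bool.or_eq_true, Bool.and_eq_true, decide_eq_true_eq] using h

theorem pv_dom_isspace (c : Char) (h : pvDomChar c = true) :
    PySem.Chars.isspace c = (c == ' ' || c == '\t' || c == '\r' || c == '\n') := by
  have hn := pv_dom_facts c h
  rw [PySem.Chars.isspace, pvCharBeqNat c ' ', pvCharBeqNat c '\t', pvCharBeqNat c '\r', pvCharBeqNat c '\n']
  rw [Bool.eq_iff_iff]
  simp only [Bool.or_eq_true, Bool.and_eq_true, decide_eq_true_eq, Char.reduceToNat]
  omega

theorem pv_dom_isB (c : Char) (h : pvDomChar c = true) :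
    pvB c = (c == '\n' || c == '\r') := by
  have hn := pv_dom_facts c h
  rw [pvB, pvCharBeqNat c '\n', pvCharBeqNat c '\r']
  rw [Bool.eq_iff_iff]
  simp only [Bool.or_eq_true, decide_eq_true_eq, Char.reduceToNat]
  omega

-- pvSplit1 structure lemmas
theorem pvSplit1_mem1 (s : List Char) : ∀ c ∈ (pvSplit1 s).1, c ∈ s := by
  induction s with
  | nil => simp [pvSplit1]
  | cons c t ih =>
    rw [pvSplit1]
    split_ifs with h1 h2 h3
    · simp
    · simp
    · simp
    · show ∀ x ∈ c :: (pvSplit1 t).1, x ∈ c :: t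
      intro x hx
      rcases List.mem_cons.mp hx with h | h
      · subst h; exact List.mem_cons_self
      · exact List.mem_cons_of_mem _ (ih x h)

theorem pvSplit1_mem2 (s : List Char) : ∀ c ∈ (pvSplit1 s).2, c ∈ s := by
  induction s with
  | nil => simp [pvSplit1]
  | cons c t ih =>
    rw [pvSplit1]
    split_ifs with h1 h2 h3
    · intro x hx; exact List.mem_cons_of_mem _ hx
    · intro x hx
      exact List.mem_cons_of_mem _ (List.mem_of_mem_tail hx)
    · intro x hx; exact List.mem_cons_of_mem _ hx
    · show ∀ x ∈ (pvSplit1 t).2, x ∈ c :: t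
      intro x hx; exact List.mem_cons_of_mem _ (ih x hx)

theorem pvSplit1_no_break (s : List Char) :
    ∀ c ∈ (pvSplit1 s).1, c ≠ '\n' ∧ c ≠ '\r' := by
  induction s with
  | nil => simp [pvSplit1]
  | cons c t ih =>
    rw [pvSplit1]
    split_ifs with h1 h2 h3
    · simp
    · simp
    · simp
    · show ∀ x ∈ c :: (pvSplit1 t).1, x ≠ '\n' ∧ x ≠ '\r'
      intro x hx
      rcases List.mem_cons.mp hx with h | h
      · subst h
        exact ⟨by simpa using h1, by simpa using h2⟩
      · exact ih x h

theorem pvSplit1_decomp (s : List Char) :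
    ∃ brk, s = (pvSplit1 s).1 ++ brk ++ (pvSplit1 s).2 ∧ ∀ c ∈ brk, c = '\n' ∨ c = '\r' := by
  induction s with
  | nil => exact ⟨[], by simp [pvSplit1]⟩
  | cons c t ih =>
    rw [pvSplit1]
    split_ifs with h1 h2 h3
    · refine ⟨['\n'], ?_, by simp⟩
      have : c = '\n' := by simpa using h1
      subst this; simp
    · have hc : c = '\r' := by simpa using h2
      have ht : t.head? = some '\n' := by simpa using h3
      cases t with
      | nil => simp at ht
      | cons d t' =>
        have hd : d = '\n' := by simpa using ht
        refine ⟨['\r', '\n'], ?_, by simp⟩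
        subst hc; subst hd; simp
    · have hc : c = '\r' := by simpa using h2
      refine ⟨['\r'], ?_, by simp⟩
      subst hc; simp
    · obtain ⟨brk, hb1, hb2⟩ := ih
      refine ⟨brk, ?_, hb2⟩
      show c :: t = (c :: (pvSplit1 t).1) ++ brk ++ (pvSplit1 t).2
      simpa using hb1

-- one-step equations for splitlines.go
theorem pv_go_nil (isB : Char → Bool) (cur : List Char) (acc : List (List Char)) :
    PySem.Chars.splitlines.go isB [] cur acc =
      if cur.isEmpty then acc.reverse else (cur.reverse :: acc).reverse := by
  rw [PySem.Chars.splitlines.go]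

theorem pv_go_crlf (isB : Char → Bool) (rest cur : List Char) (acc : List (List Char)) :
    PySem.Chars.splitlines.go isB ('\x0d' :: '\n' :: rest) cur acc =
      PySem.Chars.splitlines.go isB rest [] (cur.reverse :: acc) := by
  rw [PySem.Chars.splitlines.go]

theorem pv_go_cons (isB : Char → Bool) (c : Char) (rest cur : List Char) (acc : List (List Char))
    (h : c ≠ '\x0d' ∨ rest.head? ≠ some '\n') :
    PySem.Chars.splitlines.go isB (c :: rest) cur acc =
      if isB c then PySem.Chars.splitlines.go isB rest [] (cur.reverse :: acc)
      else PySem.Chars.splitlines.go isB rest (c :: cur) acc := by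
  rw [PySem.Chars.splitlines.go]
  intro r h1 h2
  subst h1; subst h2
  rcases h with h | h
  · exact h rfl
  · exact h rfl

-- go with an accumulator
theorem pv_go_acc (isB : Char → Bool) (s cur : List Char) (acc : List (List Char)) :
    PySem.Chars.splitlines.go isB s cur acc = acc.reverse ++ PySem.Chars.splitlines.go isB s cur [] := by
  cases s with
  | nil =>
    rw [pv_go_nil, pv_go_nil]
    split_ifs <;> simp
  | cons c t =>
    by_cases hc : c = '\x0d' ∧ t.head? = some '\n'
    · obtain ⟨rfl, ht⟩ := hc
      cases t with
      | nil => simp at ht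
      | cons d t' =>
        have hd : d = '\n' := by simpa using ht
        subst hd
        rw [pv_go_crlf, pv_go_crlf, pv_go_acc isB t' [] (cur.reverse :: acc),
            pv_go_acc isB t' [] [cur.reverse]]
        simp
    · have h' : c ≠ '\x0d' ∨ t.head? ≠ some '\n' := by tauto
      rw [pv_go_cons isB c t cur acc h', pv_go_cons isB c t cur [] h']
      split_ifs with hb
      · rw [pv_go_acc isB t [] (cur.reverse :: acc), pv_go_acc isB t [] [cur.reverse]]
        simp
      · rw [pv_go_acc isB t (c :: cur) acc]
termination_by s.length
decreasing_by all_goals simp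

theorem pv_go_step (s : List Char) (hD : s.all pvDomChar = true) (hne : s ≠ []) :
    ∀ cur, PySem.Chars.splitlines.go pvB s cur [] =
      (cur.reverse ++ (pvSplit1 s).1) :: PySem.Chars.splitlines.go pvB (pvSplit1 s).2 [] [] := by
  intro cur
  cases s with
  | nil => exact absurd rfl hne
  | cons c t =>
    have hdc : pvDomChar c = true := List.all_eq_true.mp hD c List.mem_cons_self
    have hDt : t.all pvDomChar = true := by
      rw [List.all_eq_true] at hD ⊢
      exact fun x hx => hD x (List.mem_cons_of_mem _ hx)
    by_cases h1 : c = '\n'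
    · subst h1
      rw [pv_go_cons pvB '\n' t cur [] (Or.inl (by decide)),
          if_pos (by decide : pvB '\n' = true),
          pv_go_acc pvB t [] [cur.reverse], pvSplit1]
      simp
    · by_cases h2 : c = '\x0d'
      · subst h2
        cases t with
        | nil =>
          rw [pv_go_cons pvB '\x0d' [] cur [] (Or.inr (by simp)),
              if_pos (by decide : pvB '\x0d' = true),
              pv_go_nil, pvSplit1]
          simp [pv_go_nil]
        | cons d t' =>
          by_cases hd : d = '\n'
          · subst hd
            rw [pv_go_crlf, pv_go_acc pvB t' [] [cur.reverse], pvSplit1]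
            simp
          · rw [pv_go_cons pvB '\x0d' (d :: t') cur [] (Or.inr (by simp [hd])),
                if_pos (by decide : pvB '\x0d' = true),
                pv_go_acc pvB (d :: t') [] [cur.reverse], pvSplit1]
            have hh : ((d :: t').head? == some '\n') = false := by simp [hd]
            simp [hd]
      · have hb : pvB c = false := by
          rw [pv_dom_isB c hdc]
          simp [h1, h2]
        rw [pv_go_cons pvB c t cur [] (Or.inl h2), if_neg (by simp [hb])]
        have e1 : (c == '\n') = false := by simpa using h1
        have e2 : (c == '\x0d') = false := by simpa using h2
        cases t with
        | nil =>
          rw [pv_go_nil, pvSplit1]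
          simp [e1, e2, pvSplit1, pv_go_nil]
        | cons d t' =>
          rw [pv_go_step (d :: t') hDt (by simp) (c :: cur)]
          conv_rhs => rw [pvSplit1]
          simp [e1, e2]
termination_by s.length
decreasing_by all_goals (subst_vars; simp)

theorem pv_splitlines_step (s : List Char) (hD : s.all pvDomChar = true) (hne : s ≠ []) :
    PySem.Chars.splitlines s = (pvSplit1 s).1 :: PySem.Chars.splitlines (pvSplit1 s).2 := by
  rw [pv_splitlines_eq, pv_splitlines_eq, pv_go_step s hD hne []]
  simp

-- popBlanks via reverse/dropWhile
theorem pv_popBlanks_rev (xs : List (List Char)) :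
    pvPopBlanks xs = (xs.reverse.dropWhile (fun l => l.isEmpty)).reverse := by
  fun_induction pvPopBlanks xs with
  | case1 xs h ih =>
    obtain ⟨ys, rfl⟩ := (List.getLast?_eq_some_iff).mp h
    rw [List.dropLast_concat] at ih
    rw [List.dropLast_concat, ih]
    simp
  | case2 xs h =>
    cases xs using List.reverseRecOn with
    | nil => simp
    | append_singleton ys l =>
      have hl : l ≠ [] := by
        intro hl; subst hl; simp at h
      rw [List.reverse_append]
      simp [hl]

theorem pv_popBlanks_cons (x : List Char) (xs : List (List Char)) :
    pvPopBlanks (x :: xs) =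
      if pvPopBlanks xs = [] then (if x = [] then [] else [x]) else x :: pvPopBlanks xs := by
  rw [pv_popBlanks_rev, pv_popBlanks_rev]
  rw [show (x :: xs).reverse = xs.reverse ++ [x] from by simp]
  rw [List.dropWhile_append]
  by_cases h : (xs.reverse.dropWhile (fun l => l.isEmpty)) = []
  · rw [h]
    simp only [List.isEmpty_nil, List.reverse_nil]
    by_cases hx : x = []
    · subst hx; simp
    · simp [hx]
  · have h2 : (xs.reverse.dropWhile (fun l => l.isEmpty)).reverse ≠ [] := by
      simpa using h
    simp [h, h2, List.reverse_append]

theorem pv_rstrip_eq_nil_iff (l : List Char) :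
    PySem.Chars.rstrip l = [] ↔ ∀ c ∈ l, PySem.Chars.isspace c = true := by
  rw [PySem.Chars.rstrip]
  simp only [List.reverse_eq_nil_iff, List.dropWhile_eq_nil_iff]
  constructor
  · intro h c hc; exact h c (List.mem_reverse.mpr hc)
  · intro h c hc; exact h c (List.mem_reverse.mp hc)

theorem pv_dropWhile_congr {p q : Char → Bool} : ∀ (l : List Char), (∀ c ∈ l, p c = q c) →
    l.dropWhile p = l.dropWhile q
  | [], _ => rfl
  | c :: t, h => by
    rw [List.dropWhile_cons, List.dropWhile_cons, h c List.mem_cons_self]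
    split
    · exact pv_dropWhile_congr t (fun x hx => h x (List.mem_cons_of_mem _ hx))
    · rfl

theorem pv_rstrip_eq_stripTB (l : List Char) (hD : l.all pvDomChar = true)
    (hnb : ∀ c ∈ l, c ≠ '\n' ∧ c ≠ '\r') :
    PySem.Chars.rstrip l = pvStripTB l := by
  rw [PySem.Chars.rstrip, pvStripTB]
  congr 1
  apply pv_dropWhile_congr
  intro c hc
  have hcl : c ∈ l := List.mem_reverse.mp hc
  have hdc : pvDomChar c = true := (List.all_eq_true.mp hD) c hcl
  rw [pv_dom_isspace c hdc]
  obtain ⟨hn1, hn2⟩ := hnb c hcl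
  have e1 : (c == '\r') = false := by simpa using hn2
  have e2 : (c == '\n') = false := by simpa using hn1
  rw [e1, e2]
  simp

theorem pv_blank_split (s : List Char) (hD : s.all pvDomChar = true) :
    pvRestBlank s =
      (decide (PySem.Chars.rstrip (pvSplit1 s).1 = []) && pvRestBlank (pvSplit1 s).2) := by
  obtain ⟨brk, hs, hbrk⟩ := pvSplit1_decomp s
  have hDl : (pvSplit1 s).1.all pvDomChar = true := by
    rw [List.all_eq_true]
    exact fun x hx => List.all_eq_true.mp hD x (pvSplit1_mem1 s x hx)
  have hl : (decide (PySem.Chars.rstrip (pvSplit1 s).1 = [])) = pvRestBlank (pvSplit1 s).1 := by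
    rw [Bool.eq_iff_iff]
    simp only [decide_eq_true_eq, pv_rstrip_eq_nil_iff, pvRestBlank, List.all_eq_true]
    constructor
    · intro h c hc
      have h3 := h c hc
      rw [pv_dom_isspace c (List.all_eq_true.mp hDl c hc)] at h3
      exact h3
    · intro h c hc
      rw [pv_dom_isspace c (List.all_eq_true.mp hDl c hc)]
      exact h c hc
  rw [hl]
  conv_lhs => rw [show s = (pvSplit1 s).1 ++ brk ++ (pvSplit1 s).2 from hs]
  have hbrkall : brk.all (fun c => c == ' ' || c == '\t' || c == '\x0d' || c == '\n') = true := by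
    rw [List.all_eq_true]
    intro c hc
    rcases hbrk c hc with rfl | rfl <;> rfl
  simp only [pvRestBlank, List.all_append, hbrkall, Bool.and_true]

-- blank suffix ⟺ all remaining lines pop away
theorem pv_blank_iff (s : List Char) (hD : s.all pvDomChar = true) :
    pvRestBlank s = true ↔ pvPopBlanks ((PySem.Chars.splitlines s).map PySem.Chars.rstrip) = [] := by
  by_cases hne : s = []
  · subst hne
    rw [pv_splitlines_eq, pv_go_nil]
    constructor
    · intro _
      rw [show (List.map PySem.Chars.rstrip (if List.isEmpty [] = true then ([] : List (List Char)).reverse else ([[].reverse] : List (List Char)).reverse)) = [] from by simp]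
      rw [pvPopBlanks]
      simp
    · intro _; rfl
  · have hDr : (pvSplit1 s).2.all pvDomChar = true := by
      rw [List.all_eq_true]
      exact fun x hx => List.all_eq_true.mp hD x (pvSplit1_mem2 s x hx)
    have hrec := pv_blank_iff (pvSplit1 s).2 hDr
    rw [pv_splitlines_step s hD hne, List.map_cons, pv_popBlanks_cons, pv_blank_split s hD]
    by_cases hP : pvPopBlanks ((PySem.Chars.splitlines (pvSplit1 s).2).map PySem.Chars.rstrip) = []
    · have hbr : pvRestBlank (pvSplit1 s).2 = true := hrec.mpr hP
      by_cases hL : PySem.Chars.rstrip (pvSplit1 s).1 = []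
      · simp [hP, hL, hbr]
      · simp [hP, hL, hbr]
    · have hbr : pvRestBlank (pvSplit1 s).2 = false := by
        rcases Bool.eq_false_or_eq_true (pvRestBlank (pvSplit1 s).2) with h | h
        · exact absurd (hrec.mp h) hP
        · exact h
      simp [hP, hbr]
termination_by s.length
decreasing_by all_goals exact pvSplit1_len s hne

theorem pv_pop_cons_ne (s : List Char) (hD : s.all pvDomChar = true) (hnb : pvRestBlank s ≠ true) :
    pvPopBlanks ((PySem.Chars.splitlines s).map PySem.Chars.rstrip) =
      pvStripTB (pvSplit1 s).1 ::
        pvPopBlanks ((PySem.Chars.splitlines (pvSplit1 s).2).map PySem.Chars.rstrip) := by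
  have hne : s ≠ [] := by rintro rfl; exact hnb rfl
  have hDl : (pvSplit1 s).1.all pvDomChar = true := by
    rw [List.all_eq_true]
    exact fun x hx => List.all_eq_true.mp hD x (pvSplit1_mem1 s x hx)
  have hDr : (pvSplit1 s).2.all pvDomChar = true := by
    rw [List.all_eq_true]
    exact fun x hx => List.all_eq_true.mp hD x (pvSplit1_mem2 s x hx)
  have hstrip : PySem.Chars.rstrip (pvSplit1 s).1 = pvStripTB (pvSplit1 s).1 :=
    pv_rstrip_eq_stripTB _ hDl (pvSplit1_no_break s)
  rw [pv_splitlines_step s hD hne, List.map_cons, pv_popBlanks_cons]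
  by_cases hP : pvPopBlanks ((PySem.Chars.splitlines (pvSplit1 s).2).map PySem.Chars.rstrip) = []
  · have hbr : pvRestBlank (pvSplit1 s).2 = true := (pv_blank_iff _ hDr).mpr hP
    have hLne : PySem.Chars.rstrip (pvSplit1 s).1 ≠ [] := by
      intro hL
      apply hnb
      rw [pv_blank_split s hD, hL, hbr]
      simp
    rw [if_pos hP, if_neg hLne, hstrip, hP]
  · rw [if_neg hP, hstrip]

theorem pv_main (e a : List Char) (hDe : e.all pvDomChar = true) (hDa : a.all pvDomChar = true) :
    pvCmp e a = (pvPopBlanks ((PySem.Chars.splitlines e).map PySem.Chars.rstrip) ==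
                 pvPopBlanks ((PySem.Chars.splitlines a).map PySem.Chars.rstrip)) := by
  rw [pvCmp]
  by_cases hbe : pvRestBlank e = true <;> by_cases hba : pvRestBlank a = true
  · rw [if_pos (by simp [hbe]), hbe, hba,
        (pv_blank_iff e hDe).mp hbe, (pv_blank_iff a hDa).mp hba]
    simp
  · rw [if_pos (by simp [hbe]), hbe, (pv_blank_iff e hDe).mp hbe]
    have hPa : pvPopBlanks ((PySem.Chars.splitlines a).map PySem.Chars.rstrip) ≠ [] :=
      fun h => hba ((pv_blank_iff a hDa).mpr h)
    cases hpa : pvPopBlanks ((PySem.Chars.splitlines a).map PySem.Chars.rstrip) with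
    | nil => exact absurd hpa hPa
    | cons y ys =>
      rw [Bool.not_eq_true] at hba
      simp [hba]
  · rw [if_pos (by simp [hba]), hba, (pv_blank_iff a hDa).mp hba]
    have hPe : pvPopBlanks ((PySem.Chars.splitlines e).map PySem.Chars.rstrip) ≠ [] :=
      fun h => hbe ((pv_blank_iff e hDe).mpr h)
    cases hpe : pvPopBlanks ((PySem.Chars.splitlines e).map PySem.Chars.rstrip) with
    | nil => exact absurd hpe hPe
    | cons y ys =>
      rw [Bool.not_eq_true] at hbe
      simp [hbe]
  · have hDe2 : (pvSplit1 e).2.all pvDomChar = true := by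
      rw [List.all_eq_true]
      exact fun x hx => List.all_eq_true.mp hDe x (pvSplit1_mem2 e x hx)
    have hDa2 : (pvSplit1 a).2.all pvDomChar = true := by
      rw [List.all_eq_true]
      exact fun x hx => List.all_eq_true.mp hDa x (pvSplit1_mem2 a x hx)
    rw [if_neg (by simp [hbe, hba]),
        pv_pop_cons_ne e hDe hbe, pv_pop_cons_ne a hDa hba,
        List.cons_beq_cons,
        pv_main (pvSplit1 e).2 (pvSplit1 a).2 hDe2 hDa2]
termination_by e.length
decreasing_by
  exact pvSplit1_len e (by rintro rfl; exact hbe rfl)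

-- ===== VERDICT (by name: the statement is the Claim_ definition above) =====
theorem compare_output_spec : Claim_equal_compare_output := by
  intro e a hdom
  unfold Dom_compare_output pvDomStr at hdom
  simp only [Bool.and_eq_true] at hdom
  unfold Spec_compare_output compare_output compare_output_alt pvLines
  rw [pv_main e.toList a.toList hdom.1 hdom.2]
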